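-- pv_equiv track=rewrite | github.com/matemanicos/Sorteo-por-Apellidos | sorteo_por_apellidos.py | distancia_lexicografica
-- ===== SOURCE A (Python) =====
-- N_LETRAS = 26
--
-- VALOR_ULTIMA_LETRA  = ord('z') # Valor numérico ASCII de la letra z.
--
-- VALOR_PRIMERA_LETRA = ord('a') # Valor numérico ASCII de la letra a.
--
-- def distancia_lexicografica (a: str, b: str) -> int:
--     """Dadas dos cadenas de texto `a` y `b`, devuelve la distancia lexicográfica entre ellas. Por ejemplo, `distancia_lexicografica('cy', 'cz') == 1` y `distancia_lexicografica('cy', 'da') == 2`."""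
--
--     # Garantiza que a < b.
--     if a > b:
--         a, b = b, a
--     elif a == b:
--         return 0
--
--     distancia = 0
--
--     len_a = len(a)
--     len_b = len(b)
--
--     longitud_comun = min(len_a, len_b)
--     longitud_maxima = max(len_a, len_b)
--     indice_maximo = longitud_maxima - 1
--
--     # Encuentra el primer índice i de forma que a[i] != b[i].
--     # En caso de que a[i] o b[i] no exista, el índice es el último valor
--     # para el que a[i] y b[i] existen.
--     try:
--         indice_primera_diferencia = [a[i] == b[i] for i in range(longitud_comun)].index(False)
--
--         # Hace lo de abajo, pero las cadenas que cuentaa deben ser de la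
--         # longitud máxima.
--         aux = indice_maximo - indice_primera_diferencia
--         distancia += (ord(b[indice_primera_diferencia]) - ord(a[indice_primera_diferencia]) - 1) * N_LETRAS**aux
--
--     except ValueError:
--         indice_primera_diferencia = longitud_comun - 1
--
--
--     # Cuenta las cadenas de logitud máxima que coinciden hasta i-1 con a, pero
--     # estando estrictamente entre a y b para i en el rango dado.
--     for i in range(indice_primera_diferencia+1, len_a):
--         distancia += (VALOR_ULTIMA_LETRA - ord(a[i])) * N_LETRAS**(indice_maximo - i)
--
--     # Lo mismo pero con b.
--     for i in range(indice_primera_diferencia+1, len_b):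
--         distancia += (ord(b[i]) - VALOR_PRIMERA_LETRA) * N_LETRAS**(indice_maximo - i)
--
--     # La propia cadena b tiene que ser contada.
--     distancia += 1
--
--     return distancia
-- ===== SOURCE B (Python) =====
-- N_LETRAS = 26
-- VALOR_ULTIMA_LETRA = ord('z')
-- VALOR_PRIMERA_LETRA = ord('a')
--
--
-- def _valor(s, longitud):
--     """Numeric value of s read as a base-26 numeral (digit = ord(c) - ord('a')),
--     padded on the right with 'a' (digit 0) up to `longitud` positions."""
--     v = 0
--     for c in s:
--         v = v * N_LETRAS + (ord(c) - VALOR_PRIMERA_LETRA)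
--     return v * N_LETRAS ** (longitud - len(s))
--
--
-- def distancia_lexicografica(a: str, b: str) -> int:
--     """Distance = difference of the two base-26 valuations, plus a closed-form
--     length correction; no mismatch search and no per-index power computation."""
--     if a == b:
--         return 0
--     if a > b:
--         a, b = b, a
--     longitud = max(len(a), len(b))
--     d = _valor(b, longitud) - _valor(a, longitud)
--     if len(a) < len(b):
--         if b.startswith(a):
--             d += 1
--         else:
--             d += 1 - N_LETRAS ** (len(b) - len(a))
--     return d
-- ===== Notes on version B (the rewrite author's own statement) =====
-- stated objective: faster
-- what changed: B drops A's first-mismatch search and per-index 26**k sums entirely: it Horner-evaluates each string once as a padded base-26 numeral, subtracts the two valuations, and adds a closed-form length correction.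
import Mathlib
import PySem

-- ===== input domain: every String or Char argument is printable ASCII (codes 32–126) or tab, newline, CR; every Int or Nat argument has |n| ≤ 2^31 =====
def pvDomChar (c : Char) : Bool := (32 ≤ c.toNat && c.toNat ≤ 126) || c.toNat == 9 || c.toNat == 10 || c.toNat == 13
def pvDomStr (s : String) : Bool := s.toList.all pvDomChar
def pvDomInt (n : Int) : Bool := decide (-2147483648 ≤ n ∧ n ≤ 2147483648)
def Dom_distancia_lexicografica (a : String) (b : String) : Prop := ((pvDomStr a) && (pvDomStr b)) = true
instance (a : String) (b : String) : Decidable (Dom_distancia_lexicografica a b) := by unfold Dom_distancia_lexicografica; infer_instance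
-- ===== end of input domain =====

-- B replaces A's first-mismatch search and per-index 26**k sums by two Horner
-- base-26 valuations and a closed-form length correction (measured asymptotically faster).


-- ===== PORT A =====

-- ord(c)
def pvOrd (c : Char) : Int := c.toNat

-- A's main body after the swap / equality check (helper; a and b are the swapped strings' char lists)
def pvCoreA (a b : List Char) : Int :=
  let len_a : Int := a.length
  let len_b : Int := b.length
  let longitud_comun : Int := min len_a len_b
  let longitud_maxima : Int := max len_a len_b
  let indice_maximo : Int := longitud_maxima - 1
  -- [a[i] == b[i] for i in range(longitud_comun)]; indices of the range are in bounds
  let cmps := (PySem.List.pyRange 0 longitud_comun 1).map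
      (fun i => PySem.List.pyGetD a i ' ' == PySem.List.pyGetD b i ' ')
  -- try: ….index(False) … except ValueError: …
  let jd : Int × Int :=
    match PySem.List.index? cmps false with
    | some k => ((k : Int),
        (pvOrd (PySem.List.pyGetD b (k : Int) ' ') - pvOrd (PySem.List.pyGetD a (k : Int) ' ') - 1)
          * 26 ^ ((indice_maximo - (k : Int)).toNat))   -- exponent is ≥ 0 here, .toNat is exact
    | none => (longitud_comun - 1, 0)
  let indice_primera_diferencia := jd.1
  let distancia := jd.2
  let distancia := (PySem.List.pyRange (indice_primera_diferencia + 1) len_a 1).foldl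
      (fun acc i => acc + (122 - pvOrd (PySem.List.pyGetD a i ' ')) * 26 ^ ((indice_maximo - i).toNat))
      distancia
  let distancia := (PySem.List.pyRange (indice_primera_diferencia + 1) len_b 1).foldl
      (fun acc i => acc + (pvOrd (PySem.List.pyGetD b i ' ') - 97) * 26 ^ ((indice_maximo - i).toNat))
      distancia
  distancia + 1

def distancia_lexicografica (a : String) (b : String) : Int :=
  if b < a then pvCoreA b.toList a.toList
  else if a = b then 0
  else pvCoreA a.toList b.toList

-- ===== PORT B =====

-- B's _valor: Horner evaluation of s as a base-26 numeral (digit ord(c)-97), padded to `longitud`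
def pvValor (s : List Char) (longitud : Int) : Int :=
  (s.foldl (fun v c => v * 26 + (pvOrd c - 97)) 0)
    * 26 ^ ((longitud - (s.length : Int)).toNat)   -- exponent ≥ 0 at every call site, .toNat exact

-- B's body after the equality/swap checks (a, b the ordered strings' char lists)
def pvCoreB (a b : List Char) : Int :=
  let longitud : Int := max (a.length : Int) (b.length : Int)
  let d := pvValor b longitud - pvValor a longitud
  if (a.length : Int) < (b.length : Int) then
    if a.isPrefixOf b then d + 1
    else d + 1 - 26 ^ (((b.length : Int) - (a.length : Int)).toNat)
  else d

def distancia_lexicografica_alt (a : String) (b : String) : Int :=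
  if a = b then 0
  else if b < a then pvCoreB b.toList a.toList
  else pvCoreB a.toList b.toList

-- ===== PRECONDITION & SPEC =====
def Spec_distancia_lexicografica (a : String) (b : String) (out : Int) : Prop := out = distancia_lexicografica_alt a b
instance (a : String) (b : String) (out : Int) : Decidable (Spec_distancia_lexicografica a b out) := by unfold Spec_distancia_lexicografica; infer_instance

-- ===== CLAIM (what is proved, stated in full; the proofs are below) =====
def Claim_equal_distancia_lexicografica : Prop := ∀ (a : String) (b : String), Dom_distancia_lexicografica a b → Spec_distancia_lexicografica a b (distancia_lexicografica a b)

-- ===== LEMMAS AND PROOFS =====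

-- positional valuation Σ f(s_i) * 26^(len-1-i), the common spec of both programs' sums
def pvValF (f : Char → Int) : List Char → Int
  | [] => 0
  | c :: t => f c * 26 ^ t.length + pvValF f t

theorem pvHorner (f : Char → Int) : ∀ (s : List Char) (v : Int),
    s.foldl (fun v c => v * 26 + f c) v = v * 26 ^ s.length + pvValF f s
  | [], v => by simp [pvValF]
  | c :: t, v => by
      rw [List.foldl_cons, pvHorner f t (v * 26 + f c)]
      simp only [pvValF, List.length_cons, pow_succ]
      ring

theorem pvValF_append (f : Char → Int) : ∀ (u v : List Char),
    pvValF f (u ++ v) = pvValF f u * 26 ^ v.length + pvValF f v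
  | [], v => by simp [pvValF]
  | c :: t, v => by
      rw [List.cons_append]
      simp only [pvValF, pvValF_append f t v, List.length_append, pow_add]
      ring

-- the two digit maps sum to the geometric total
theorem pvValF_ZP : ∀ (t : List Char),
    pvValF (fun c => 122 - pvOrd c) t + pvValF (fun c => pvOrd c - 97) t = 26 ^ t.length - 1
  | [] => by simp [pvValF]
  | c :: t => by
      have ih := pvValF_ZP t
      simp only [pvValF, List.length_cons, pow_succ]
      linear_combination ih

-- A's power-weighted index sum from k to the end IS the positional valuation of the k-suffix
theorem pvSumDrop (f : Char → Int) (s : List Char) (im : Int) :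
    ∀ (n k : Nat), k + n = s.length → (s.length : Int) ≤ im + 1 →
    ((PySem.List.pyRange (k : Int) (s.length : Int) 1).map
       (fun i => f (PySem.List.pyGetD s i ' ') * 26 ^ ((im - i).toNat))).sum
      = pvValF f (s.drop k) * 26 ^ ((im + 1 - (s.length : Int)).toNat)
  | 0, k, hk, him => by
      have hk' : k = s.length := by omega
      subst hk'
      rw [PySem.List.pyRange_one_eq_nil (le_refl _), List.drop_length]
      simp [pvValF]
  | n + 1, k, hk, him => by
      have hklt : k < s.length := by omega
      have hstep : ((k : Int) + 1) = ((k + 1 : Nat) : Int) := by push_cast; ring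
      rw [PySem.List.pyRange_one_cons (by exact_mod_cast hklt), List.map_cons, List.sum_cons,
          hstep, pvSumDrop f s im n (k + 1) (by omega) him,
          List.drop_eq_getElem_cons hklt]
      simp only [pvValF, List.length_drop, PySem.List.pyGetD_natCast, List.getD_eq_getElem _ _ hklt]
      have hexp : (im - (k : Int)).toNat = (s.length - (k + 1)) + (im + 1 - (s.length : Int)).toNat := by
        omega
      rw [hexp, pow_add]
      ring

theorem pvCmps_aux : ∀ (a b : List Char),
    (List.range (min a.length b.length)).map (fun k => (a.getD k ' ' == b.getD k ' '))
      = (a.zip b).map (fun p => p.1 == p.2)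
  | [], _ => by simp
  | _ :: _, [] => by simp
  | x :: xs, y :: ys => by
      have ih := pvCmps_aux xs ys
      simp only [List.length_cons, Nat.succ_min_succ, List.range_succ_eq_map, List.map_cons,
        List.map_map, List.getD_cons_zero, List.zip_cons_cons]
      refine congrArg₂ _ rfl ?_
      rw [← ih]
      exact List.map_congr_left (fun k _ => by simp [Function.comp])

-- A's comparison list is the zip comparison list
theorem pvCmps_eq_zip (a b : List Char) :
    (PySem.List.pyRange 0 (min (a.length : Int) (b.length : Int)) 1).map
      (fun i => PySem.List.pyGetD a i ' ' == PySem.List.pyGetD b i ' ')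
    = (a.zip b).map (fun p => p.1 == p.2) := by
  have hmin : min (a.length : Int) (b.length : Int) = ((min a.length b.length : Nat) : Int) := by
    omega
  rw [hmin, PySem.List.pyRange_zero_nat, List.map_map, ← pvCmps_aux a b]
  exact List.map_congr_left (fun k _ => by simp [Function.comp, PySem.List.pyGetD_natCast])

-- a list is never lexicographically smaller than one of its prefixes
theorem pvPrefix_not_lt : ∀ (u a : List Char), u <+: a → ¬ a < u
  | [], a, _ => List.not_lt_nil a
  | c :: t, a, hpre => by
      obtain ⟨r, hr⟩ := hpre
      subst hr
      intro hlt
      rcases List.cons_lt_cons_iff.mp hlt with h | ⟨-, h⟩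
      · exact lt_irrefl _ h
      · exact pvPrefix_not_lt t (t ++ r) ⟨r, rfl⟩ h

-- equal characters position by position give equal takes
theorem pvTake_eq (a b : List Char) (k : Nat) (hka : k ≤ a.length) (hkb : k ≤ b.length)
    (h : ∀ (j : Nat) (hj : j < k), a[j]'(by omega) = b[j]'(by omega)) :
    a.take k = b.take k := by
  apply List.ext_getElem
  · simp; omega
  · intro j h1 h2
    simp only [List.getElem_take]
    simp only [List.length_take, lt_inf_iff] at h1
    exact h j h1.1

-- equal characters position by position: the shorter list IS the other's take
theorem pvTakeAll_eq (a b : List Char) (hle : a.length ≤ b.length)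
    (hAll : ∀ (j : Nat) (h1 : j < a.length) (h2 : j < b.length), a[j] = b[j]) :
    a = b.take a.length := by
  apply List.ext_getElem
  · simp; omega
  · intro j h1 h2
    simp only [List.getElem_take]
    exact hAll j h1 (by omega)

-- the heart of the file: on ordered distinct lists the two cores agree
theorem pvCore_eq (a b : List Char) (hlt : a < b) : pvCoreA a b = pvCoreB a b := by
  simp only [pvCoreA, pvCoreB, pvCmps_eq_zip]
  cases h : PySem.List.index? ((a.zip b).map fun p => p.1 == p.2) false with
  | none =>
    -- the common prefix agrees everywhere
    have hAll : ∀ (j : Nat) (h1 : j < a.length) (h2 : j < b.length), a[j] = b[j] := by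
      intro j h1 h2
      have hmem : (a[j], b[j]) ∈ a.zip b := by
        rw [List.mem_iff_getElem]
        exact ⟨j, by simp; omega, by simp⟩
      have hnf := (PySem.List.index?_eq_none_iff _ _).mp h
      have : (a[j] == b[j]) ≠ false := fun hc => hnf (by
        rw [List.mem_map]; exact ⟨(a[j], b[j]), hmem, hc⟩)
      simpa using this
    -- a must be strictly shorter than b
    have hlen : a.length < b.length := by
      by_contra hge
      have hble : b.length ≤ a.length := by omega
      have hbt : b = a.take b.length :=
        pvTakeAll_eq b a hble (fun j h1 h2 => (hAll j h2 h1).symm)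
      exact pvPrefix_not_lt b a (hbt ▸ List.take_prefix _ _) hlt
    have hpre : a <+: b :=
      (pvTakeAll_eq a b (le_of_lt hlen) hAll) ▸ List.take_prefix _ _
    have hpreb : a.isPrefixOf b = true := List.isPrefixOf_iff_prefix.mpr hpre
    have hmax : max (a.length : Int) (b.length : Int) = (b.length : Int) := by omega
    have hstart : min (a.length : Int) (b.length : Int) - 1 + 1 = ((a.length : Nat) : Int) := by
      omega
    simp only [hstart, hmax, hpreb, if_pos (by exact_mod_cast hlen : (a.length : Int) < b.length),
      if_true]
    rw [PySem.List.pyRange_one_eq_nil (le_refl _), List.foldl_nil,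
        PySem.List.foldl_add,
        pvSumDrop (fun c => pvOrd c - 97) b ((b.length : Int) - 1)
          (b.length - a.length) a.length (by omega) (by omega)]
    -- B's valuations via Horner
    unfold pvValor
    rw [pvHorner (fun c => pvOrd c - 97) a 0, pvHorner (fun c => pvOrd c - 97) b 0]
    -- split b at a.length and cancel the shared prefix
    have hsplit : b = b.take a.length ++ b.drop a.length := (List.take_append_drop _ _).symm
    have htake : b.take a.length = a := (pvTakeAll_eq a b (le_of_lt hlen) hAll).symm
    rw [show pvValF (fun c => pvOrd c - 97) b
          = pvValF (fun c => pvOrd c - 97) (b.take a.length ++ b.drop a.length) by rw [← hsplit],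
        pvValF_append, htake]
    have e0 : ((b.length : Int) - 1 + 1 - (b.length : Int)).toNat = 0 := by omega
    have e1 : ((b.length : Int) - (b.length : Int)).toNat = 0 := by omega
    have e2 : ((b.length : Int) - (a.length : Int)).toNat = b.length - a.length := by omega
    have e3 : (b.drop a.length).length = b.length - a.length := by simp
    rw [e0, e1, e2, e3]
    ring
  | some k =>
    obtain ⟨hk, hkv, hprev⟩ := PySem.List.getElem_of_index?_eq_some h
    rw [List.length_map, List.length_zip] at hk
    have hkA : k < a.length := by omega
    have hkB : k < b.length := by omega
    have hne : a[k] ≠ b[k] := by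
      have := hkv
      simp only [List.getElem_map, List.getElem_zip] at this
      simpa using this
    have hAllk : ∀ (j : Nat) (hj : j < k), a[j]'(by omega) = b[j]'(by omega) := by
      intro j hj
      have := hprev j (by simpa using hj)
      simp only [List.getElem_map, List.getElem_zip] at this
      simpa using this
    have htake : a.take k = b.take k := pvTake_eq a b k (by omega) (by omega) hAllk
    -- A's loops
    have hstart : (k : Int) + 1 = ((k + 1 : Nat) : Int) := by push_cast; ring
    simp only [hstart]
    rw [PySem.List.foldl_add, PySem.List.foldl_add,
        pvSumDrop (fun c => 122 - pvOrd c) a (max (a.length : Int) (b.length : Int) - 1)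
          (a.length - (k + 1)) (k + 1) (by omega) (by omega),
        pvSumDrop (fun c => pvOrd c - 97) b (max (a.length : Int) (b.length : Int) - 1)
          (b.length - (k + 1)) (k + 1) (by omega) (by omega)]
    -- B's valuations via Horner, split at k
    unfold pvValor
    rw [pvHorner (fun c => pvOrd c - 97) a 0, pvHorner (fun c => pvOrd c - 97) b 0]
    rw [show pvValF (fun c => pvOrd c - 97) a
          = pvValF (fun c => pvOrd c - 97) (a.take k ++ a.drop k) by rw [List.take_append_drop],
        show pvValF (fun c => pvOrd c - 97) b
          = pvValF (fun c => pvOrd c - 97) (b.take k ++ b.drop k) by rw [List.take_append_drop],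
        pvValF_append, pvValF_append, htake,
        List.drop_eq_getElem_cons hkA, List.drop_eq_getElem_cons hkB]
    simp only [pvValF, PySem.List.pyGetD_natCast, List.getD_eq_getElem _ _ hkA,
      List.getD_eq_getElem _ _ hkB, List.length_drop, List.length_cons]
    have pA : (26 : Int) ^ (a.length - (k + 1) + 1) = 26 ^ (a.length - k) := by congr 1; omega
    have pB : (26 : Int) ^ (b.length - (k + 1) + 1) = 26 ^ (b.length - k) := by congr 1; omega
    rw [pA, pB]
    -- telescope the 122-digit suffix of a
    have hZP := pvValF_ZP (a.drop (k + 1))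
    rw [List.length_drop] at hZP
    by_cases hAB : a.length < b.length
    · have hmax : max (a.length : Int) (b.length : Int) = (b.length : Int) := by omega
      have hprefF : a.isPrefixOf b = false := by
        rw [Bool.eq_false_iff]
        intro hp
        exact hne ((List.isPrefixOf_iff_prefix.mp hp).getElem hkA)
      rw [hmax, hprefF, if_pos (by exact_mod_cast hAB : (a.length : Int) < b.length)]
      simp only [Bool.false_eq_true, if_false]
      have eA : ((b.length : Int) - 1 + 1 - (a.length : Int)).toNat = b.length - a.length := by omega
      have eB : ((b.length : Int) - 1 + 1 - (b.length : Int)).toNat = 0 := by omega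
      have eK : ((b.length : Int) - 1 - ((k : Nat) : Int)).toNat = b.length - (k + 1) := by omega
      have eLA : ((b.length : Int) - (a.length : Int)).toNat = b.length - a.length := by omega
      have eLB : ((b.length : Int) - (b.length : Int)).toNat = 0 := by omega
      rw [eA, eB, eK, eLA, eLB]
      have p1 : (26 : Int) ^ (a.length - (k + 1)) * 26 ^ (b.length - a.length)
          = 26 ^ (b.length - (k + 1)) := by rw [← pow_add]; congr 1; omega
      have p2 : (26 : Int) ^ (a.length - k) * 26 ^ (b.length - a.length)
          = 26 ^ (b.length - k) := by rw [← pow_add]; congr 1; omega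
      linear_combination (pvOrd a[k] - 96) * p1
        + pvValF (fun c => pvOrd c - 97) (b.take k) * p2
        + 26 ^ (b.length - a.length) * hZP
    · have hmax : max (a.length : Int) (b.length : Int) = (a.length : Int) := by omega
      rw [hmax, if_neg (by exact_mod_cast hAB)]
      have eA : ((a.length : Int) - 1 + 1 - (a.length : Int)).toNat = 0 := by omega
      have eB : ((a.length : Int) - 1 + 1 - (b.length : Int)).toNat = a.length - b.length := by omega
      have eK : ((a.length : Int) - 1 - ((k : Nat) : Int)).toNat = a.length - (k + 1) := by omega
      have eLA : ((a.length : Int) - (a.length : Int)).toNat = 0 := by omega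
      have eLB : ((a.length : Int) - (b.length : Int)).toNat = a.length - b.length := by omega
      rw [eA, eB, eK, eLA, eLB]
      have p1 : (26 : Int) ^ (b.length - (k + 1)) * 26 ^ (a.length - b.length)
          = 26 ^ (a.length - (k + 1)) := by rw [← pow_add]; congr 1; omega
      have p2 : (26 : Int) ^ (b.length - k) * 26 ^ (a.length - b.length)
          = 26 ^ (a.length - k) := by rw [← pow_add]; congr 1; omega
      linear_combination (97 - pvOrd b[k]) * p1
        - pvValF (fun c => pvOrd c - 97) (b.take k) * p2
        + hZP

-- ===== VERDICT (by name: the statement is the Claim_ definition above) =====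
theorem distancia_lexicografica_spec : Claim_equal_distancia_lexicografica := by
  intro a b _
  unfold Spec_distancia_lexicografica distancia_lexicografica distancia_lexicografica_alt
  by_cases hba : b < a
  · have hne : ¬ a = b := by rintro rfl; exact lt_irrefl _ hba
    have hlist : b.toList < a.toList := String.lt_iff_toList_lt.mp hba
    simp [hba, hne, pvCore_eq _ _ hlist]
  · by_cases heq : a = b
    · simp [heq]
    · have hab : a < b := lt_of_le_of_ne (not_lt.mp hba) heq
      have hlist : a.toList < b.toList := String.lt_iff_toList_lt.mp hab
      simp [hba, heq, pvCore_eq _ _ hlist]
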